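-- pv_equiv track=rewrite | github.com/SeanC52111/spyder | othersprogram.py | create7Data
-- ===== SOURCE A (Python) =====
-- def create7Data(emotionlist,Ncount):
--     rst = []
--     for i in range(7):
--         data = []
--         label = []
--         data = [e for e in emotionlist[i]]
--         for j in range(7):
--             if j!=i:
--                 data += [e for e in emotionlist[j]]
--         label = [1]*len(emotionlist[i])
--         label += [-1]*(Ncount - len(emotionlist[i]))
--         rst.append([data,label])
--
--     return rst
-- ===== SOURCE B (Python) =====
-- def create7Data(emotionlist, Ncount):
--     # Precompute the flat concatenation of the 7 blocks and each block's start offset,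
--     # then build every dataset with two slices instead of an inner j-loop.
--     flat = []
--     start = []
--     for block in emotionlist[:7]:
--         start.append(len(flat))
--         flat.extend(block)
--     rst = []
--     for i in range(7):
--         block = emotionlist[i]
--         n = len(block)
--         data = block[:] + flat[:start[i]] + flat[start[i] + n:]
--         label = [1] * n + [-1] * (Ncount - n)
--         rst.append([data, label])
--     return rst
-- ===== Notes on version B (the rewrite author's own statement) =====
-- stated objective: simpler
-- what changed: Replaces the inner j-loop over the other 6 classes by one precomputed flat concatenation with start offsets, so each dataset is built from two slices of the flat list.
import Mathlib
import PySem

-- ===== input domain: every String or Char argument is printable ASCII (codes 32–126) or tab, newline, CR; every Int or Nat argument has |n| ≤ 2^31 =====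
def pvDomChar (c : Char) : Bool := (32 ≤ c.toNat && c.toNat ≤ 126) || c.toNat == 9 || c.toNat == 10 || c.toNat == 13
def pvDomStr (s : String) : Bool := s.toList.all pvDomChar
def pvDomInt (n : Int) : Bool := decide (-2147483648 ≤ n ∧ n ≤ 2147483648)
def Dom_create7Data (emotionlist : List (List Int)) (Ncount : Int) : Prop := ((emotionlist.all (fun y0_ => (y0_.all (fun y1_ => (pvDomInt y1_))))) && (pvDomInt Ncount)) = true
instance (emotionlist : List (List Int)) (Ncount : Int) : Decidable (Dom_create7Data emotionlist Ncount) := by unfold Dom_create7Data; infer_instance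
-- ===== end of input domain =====

-- B builds each dataset from one precomputed flat concatenation plus two slices instead of A's inner j-loop; same return values.

-- ===== PORT A =====
def create7Data (emotionlist : List (List Int)) (Ncount : Int) : List (List (List Int)) :=
  (PySem.List.pyRange 0 7 1).foldl (fun rst i =>
    let blk := (PySem.List.pyGet? emotionlist i).getD []
    let data0 := blk.map (fun e => e)
    let data := (PySem.List.pyRange 0 7 1).foldl (fun d j =>
        if j ≠ i then d ++ ((PySem.List.pyGet? emotionlist j).getD []).map (fun e => e) else d) data0
    let label := List.replicate blk.length (1 : Int) ++
        List.replicate (Ncount - (blk.length : Int)).toNat (-1 : Int)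
    rst ++ [[data, label]]) []

-- ===== PORT B =====
def create7Data_alt (emotionlist : List (List Int)) (Ncount : Int) : List (List (List Int)) :=
  let fs := (PySem.List.slice emotionlist none (some 7)).foldl
      (fun (p : List Int × List Int) block => (p.1 ++ block, p.2 ++ [(p.1.length : Int)])) ([], [])
  let flat := fs.1
  let start := fs.2
  (PySem.List.pyRange 0 7 1).foldl (fun rst i =>
    let block := (PySem.List.pyGet? emotionlist i).getD []
    let n : Int := block.length
    let s := (PySem.List.pyGet? start i).getD 0
    let data := block ++ PySem.List.slice flat none (some s) ++ PySem.List.slice flat (some (s + n)) none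
    let label := List.replicate block.length (1 : Int) ++
        List.replicate (Ncount - n).toNat (-1 : Int)
    rst ++ [[data, label]]) []

-- ===== PRECONDITION & SPEC =====
-- Python A indexes emotionlist[0]..emotionlist[6] and raises IndexError on shorter lists.
def Pre_create7Data (emotionlist : List (List Int)) (Ncount : Int) : Prop := 7 ≤ emotionlist.length
instance (emotionlist : List (List Int)) (Ncount : Int) : Decidable (Pre_create7Data emotionlist Ncount) := by unfold Pre_create7Data; infer_instance
def pvWitness_create7Data : List (List Int) × Int := ([[1], [2, 3], [], [4], [5], [6], [7]], 3)

def Spec_create7Data (emotionlist : List (List Int)) (Ncount : Int) (out : List (List (List Int))) : Prop := out = create7Data_alt emotionlist Ncount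
instance (emotionlist : List (List Int)) (Ncount : Int) (out : List (List (List Int))) : Decidable (Spec_create7Data emotionlist Ncount out) := by unfold Spec_create7Data; infer_instance

-- ===== CLAIM (what is proved, stated in full; the proofs are below) =====
def Claim_equal_create7Data : Prop := ∀ (emotionlist : List (List Int)) (Ncount : Int), Dom_create7Data emotionlist Ncount → Pre_create7Data emotionlist Ncount → Spec_create7Data emotionlist Ncount (create7Data emotionlist Ncount)


-- ===== LEMMAS AND PROOFS =====
set_option maxHeartbeats 2000000 in
set_option maxRecDepth 8000 in
theorem create7Data_key (l0 l1 l2 l3 l4 l5 l6 : List Int) (rest : List (List Int)) (N : Int) :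
    create7Data (l0::l1::l2::l3::l4::l5::l6::rest) N = create7Data_alt (l0::l1::l2::l3::l4::l5::l6::rest) N := by
  have hr : PySem.List.pyRange 0 7 1 = [((0:Nat):Int),((1:Nat):Int),((2:Nat):Int),((3:Nat):Int),((4:Nat):Int),((5:Nat):Int),((6:Nat):Int)] := by decide
  have hs : PySem.List.slice (l0::l1::l2::l3::l4::l5::l6::rest) none (some 7) = [l0,l1,l2,l3,l4,l5,l6] := by
    rw [PySem.List.slice_to _ (show (0:Int) ≤ 7 by norm_num)]
    simp [List.take_succ_cons]
  simp only [create7Data, create7Data_alt, hr, hs, List.foldl, PySem.List.pyGet?_natCast,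
    List.getElem?_cons_zero, List.getElem?_cons_succ, Option.getD_some, List.nil_append,
    List.append_assoc, ne_eq, Nat.cast_inj, Nat.reduceEqDiff,
    not_false_eq_true, not_true_eq_false, reduceIte, List.cons_append,
    List.cons.injEq, and_true]
  repeat' apply And.intro
  all_goals
    first
    | rfl
    | simp only [List.map_id', ← Nat.cast_add,
        PySem.List.slice_to_natCast, PySem.List.slice_from_natCast, List.length_nil,
        List.length_append,
        List.take_append, List.drop_append, List.take_of_length_le, List.drop_eq_nil_of_le,
        Nat.add_sub_cancel_left, Nat.le_add_right, Nat.sub_self, Nat.le_refl,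
        Nat.add_assoc, Nat.zero_add, Nat.zero_sub,
        List.take_zero, List.drop_zero,
        List.append_nil, List.nil_append, List.append_assoc]

-- ===== VERDICT (by name: the statement is the Claim_ definition above) =====
theorem create7Data_spec : Claim_equal_create7Data := by
  intro el N _ hpre
  unfold Pre_create7Data at hpre
  unfold Spec_create7Data
  rcases el with _ | ⟨l0, _ | ⟨l1, _ | ⟨l2, _ | ⟨l3, _ | ⟨l4, _ | ⟨l5, _ | ⟨l6, rest⟩⟩⟩⟩⟩⟩⟩ <;>
    simp only [List.length_nil, List.length_cons] at hpre <;> try omega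
  exact create7Data_key l0 l1 l2 l3 l4 l5 l6 rest N
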